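-- pv_equiv track=rewrite | github.com/ccctw-ma/leetcode | src/InterviewTest/23.3.19mihayou.py | check
-- ===== SOURCE A (Python) =====
-- from collections import defaultdict, deque, Counter
--
-- def f(s):
--     buc = Counter()
--     remain = ''
--     f = True
--     for c in s:
--         if c in 'mhy':
--             buc[c] += 1
--             if buc['h'] > buc['m'] or buc['y'] > buc['h'] or buc['y'] > buc['m']:
--                 f = False
--                 break
--         else:
--             remain += c
--     if f:
--         return remain
--     else:
--         return '#'
--
-- def ff(s, t):
--     c1 = Counter(s)
--     c2 = Counter(t)
--     c = c2 - c1
--     for k in c: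
--         if k not in 'mhy':
--             return False
--     return c['m'] == c['h'] == c['y']
--
-- def check(s, t):
--     if not ff(s, t):
--         return False
--     s = f(s)
--     if s == '#':
--         return False
--     diff = ''
--     i = j = 0
--     m, n = len(s), len(t)
--     while i < m and j < n:
--         if s[i] == t[j]:
--             i += 1
--             j += 1
--         else:
--             diff += t[j]
--             j += 1
--     if i != m:
--         return False
--     diff += t[j:]
--     cnt = Counter(diff)
--     a, b, c = cnt['m'], cnt['h'], cnt['y']
--     if a != b or b != c or a != c or a + b + c != len(diff):
--         return False
--     buc = Counter()
--     for c in diff: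
--         buc[c] += 1
--         if buc['h'] > buc['m'] or buc['y'] > buc['h'] or buc['y'] > buc['m']:
--             return False
--     return True
-- ===== SOURCE B (Python) =====
-- def _mhy_run(cs):
--     # counts of a pure m/h/y sequence if every prefix has #m >= #h >= #y, else None
--     m = h = y = 0
--     for c in cs:
--         if c == 'm':
--             m += 1
--         elif c == 'h':
--             h += 1
--         else:
--             y += 1
--         if h > m or y > h:
--             return None
--     return m, h, y
--
--
-- def check(s, t):
--     # s's own m/h/y subsequence must be prefix-ordered
--     ps = _mhy_run([c for c in s if c in 'mhy'])
--     if ps is None: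
--         return False
--     # t's non-m/h/y characters must be exactly s's, in the same order
--     if [c for c in t if c not in 'mhy'] != [c for c in s if c not in 'mhy']:
--         return False
--     # t's m/h/y subsequence must be prefix-ordered with equal totals
--     pt = _mhy_run([c for c in t if c in 'mhy'])
--     if pt is None or not (pt[0] == pt[1] == pt[2]):
--         return False
--     # the positive surpluses of t over s in m, h, y must be equal
--     sm, sh, sy = (max(a - b, 0) for a, b in zip(pt, ps))
--     return sm == sh == sy
-- ===== Notes on version B (the rewrite author's own statement) =====
-- stated objective: simpler
-- what changed: B drops A's Counter subtraction and two-pointer subsequence walk entirely: it splits each string into its m/h/y subsequence and its non-mhy residue, tests the two residues for plain list equality (which subsumes A's subsequence match, its i==m test and the all-mhy/length checks on the skipped characters), and validates the two m/h/y runs with one shared prefix-counting helper.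
-- intended difference: On inputs where the non-mhy residual of s is exactly the one-character string '#' (and the match would otherwise succeed), A returns False because its helper f uses '#' as an in-band failure sentinel and mistakes the legitimate residual for it (e.g. check('#','#')), while B returns True, the intended answer. — e.g. on check("#", "#"): A returns false, B returns true
import Mathlib
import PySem

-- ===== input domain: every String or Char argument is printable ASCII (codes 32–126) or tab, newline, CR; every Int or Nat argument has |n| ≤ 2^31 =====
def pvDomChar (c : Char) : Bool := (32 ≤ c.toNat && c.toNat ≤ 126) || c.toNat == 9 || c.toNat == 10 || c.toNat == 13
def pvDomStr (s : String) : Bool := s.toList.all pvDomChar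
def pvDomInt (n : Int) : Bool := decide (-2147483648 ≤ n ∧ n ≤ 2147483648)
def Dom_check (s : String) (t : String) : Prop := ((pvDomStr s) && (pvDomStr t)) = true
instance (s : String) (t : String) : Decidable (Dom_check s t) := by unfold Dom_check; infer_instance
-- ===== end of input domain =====

-- B drops A's Counter subtraction and two-pointer walk: it splits each string into its m/h/y
-- subsequence and its non-mhy residue, compares the residues by plain list equality, and
-- validates the two m/h/y runs with one shared prefix-counting helper (objective: simpler).

-- ===== PORT A =====
-- Counter.__sub__, first loop (the second loop never fires: Counter(str) has no negative counts)
def counterSub (c2 c1 : PySem.Dict Char Int) : PySem.Dict Char Int :=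
  c2.items.foldl (fun r kv =>
    if 0 < kv.2 - c1.getD kv.1 0 then r.insert kv.1 (kv.2 - c1.getD kv.1 0) else r)
    PySem.Dict.empty

-- ff(s, t); 'k not in "mhy"' on a single-character key = char membership; the early-return key
-- loop is the List.all over the keys
def ffA (sl tl : List Char) : Bool :=
  let c1 := PySem.Dict.counter sl
  let c2 := PySem.Dict.counter tl
  let c := counterSub c2 c1
  if c.keys.all (fun k => ['m', 'h', 'y'].contains k) then
    c.getD 'm' 0 == c.getD 'h' 0 && c.getD 'h' 0 == c.getD 'y' 0
  else false

-- the loop of f(s): state = (buc, remain); returns (remain, flag)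
def fLoopA : List Char → PySem.Dict Char Int → List Char → List Char × Bool
  | [], _, remain => (remain, true)
  | c :: rest, buc, remain =>
    if ['m', 'h', 'y'].contains c then
      let buc' := buc.modify c 0 (· + 1)
      if buc'.getD 'h' 0 > buc'.getD 'm' 0 || buc'.getD 'y' 0 > buc'.getD 'h' 0 ||
          buc'.getD 'y' 0 > buc'.getD 'm' 0 then
        (remain, false)  -- break with f = False
      else fLoopA rest buc' remain
    else fLoopA rest buc (remain ++ [c])

-- f(s): '#' is the in-band sentinel string
def fA (sl : List Char) : List Char :=
  let res := fLoopA sl PySem.Dict.empty []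
  if res.2 then res.1 else ['#']

-- the two-pointer while loop: s[i:], t[j:], diff; stops when either index runs out
def whileA : List Char → List Char → List Char → List Char × List Char × List Char
  | si, [], diff => (si, [], diff)
  | [], tj, diff => ([], tj, diff)
  | c :: si, d :: tj, diff =>
    if c == d then whileA si tj diff else whileA (c :: si) tj (diff ++ [d])
  termination_by si tj _ => si.length + tj.length

-- the final prefix-validation loop over diff
def prefLoopA : List Char → PySem.Dict Char Int → Bool
  | [], _ => true
  | c :: rest, buc =>
    let buc' := buc.modify c 0 (· + 1)
    if buc'.getD 'h' 0 > buc'.getD 'm' 0 || buc'.getD 'y' 0 > buc'.getD 'h' 0 ||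
        buc'.getD 'y' 0 > buc'.getD 'm' 0 then false
    else prefLoopA rest buc'

def check (s : String) (t : String) : Bool :=
  if !(ffA s.toList t.toList) then false
  else
    let s' := fA s.toList
    if s' == ['#'] then false
    else
      let res := whileA s' t.toList []
      if !(res.1.isEmpty) then false  -- i != m
      else
        let diff := res.2.2 ++ res.2.1  -- diff += t[j:]
        let cnt := PySem.Dict.counter diff
        let a := cnt.getD 'm' 0
        let b := cnt.getD 'h' 0
        let c := cnt.getD 'y' 0
        if a != b || b != c || a != c || a + b + c != (diff.length : Int) then false
        else prefLoopA diff PySem.Dict.empty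

-- ===== PORT B =====
-- 'c in "mhy"'
def isMhyB (c : Char) : Bool := (['m', 'h', 'y'] : List Char).contains c

-- _mhy_run(cs): counts of a pure m/h/y sequence if every prefix has #m >= #h >= #y, else None
def mhyRunB : List Char → Int → Int → Int → Option (Int × Int × Int)
  | [], m, h, y => some (m, h, y)
  | c :: rest, m, h, y =>
    let st := if c == 'm' then (m + 1, h, y) else if c == 'h' then (m, h + 1, y) else (m, h, y + 1)
    if st.2.1 > st.1 || st.2.2 > st.2.1 then none else mhyRunB rest st.1 st.2.1 st.2.2

def check_alt (s : String) (t : String) : Bool :=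
  match mhyRunB (s.toList.filter (fun c => isMhyB c)) 0 0 0 with
  | none => false
  | some ps =>
    if (t.toList.filter (fun c => !isMhyB c)) != (s.toList.filter (fun c => !isMhyB c)) then false
    else
      match mhyRunB (t.toList.filter (fun c => isMhyB c)) 0 0 0 with
      | none => false
      | some pt =>
        if !(pt.1 == pt.2.1 && pt.2.1 == pt.2.2) then false
        else
          let sm := max (pt.1 - ps.1) 0
          let sh := max (pt.2.1 - ps.2.1) 0
          let sy := max (pt.2.2 - ps.2.2) 0
          sm == sh && sh == sy

-- ===== PRECONDITION & SPEC =====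
-- helpers for D_check only (closed-form conditions on the input; independent of both ports)
-- every prefix of cs has #'h' ≤ #'m' and #'y' ≤ #'h'
def mhyPrefixLe (cs : List Char) : Bool :=
  (List.range (cs.length + 1)).all (fun n =>
    (cs.take n).count 'h' ≤ (cs.take n).count 'm' && (cs.take n).count 'y' ≤ (cs.take n).count 'h')

-- On inputs where s's non-mhy residual is exactly the one-character string "#" and the match
-- would otherwise succeed, A returns False (its helper f uses '#' as an in-band sentinel, so the
-- legitimate residual "#" is mistaken for the failure marker) while B returns True, the intended
-- answer (e.g. check("#", "#")).
def nonMhy (c : Char) : Bool := !(c == 'm' || c == 'h' || c == 'y')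

def D_check (s : String) (t : String) : Prop :=
  s.toList.filter nonMhy = ['#']
  ∧ t.toList.filter nonMhy = ['#']
  ∧ mhyPrefixLe s.toList = true ∧ mhyPrefixLe t.toList = true
  ∧ t.toList.count 'm' = t.toList.count 'h' ∧ t.toList.count 'h' = t.toList.count 'y'
  ∧ (t.toList.count 'm' ≤ s.toList.count 'y' ∨ s.toList.count 'm' = s.toList.count 'y')
instance (s : String) (t : String) : Decidable (D_check s t) := by unfold D_check; infer_instance

def Spec_check (s : String) (t : String) (out : Bool) : Prop := ¬ D_check s t → out = check_alt s t
instance (s : String) (t : String) (out : Bool) : Decidable (Spec_check s t out) := by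
  unfold Spec_check; infer_instance

def pvDiffWitness_check : String × String := ("#", "#")
def pvDiffWitnessOut_check : Bool × Bool := (false, true)

-- ===== CLAIM (what is proved, stated in full; the proofs are below) =====
def Claim_unchanged_check : Prop := ∀ (s : String) (t : String), Dom_check s t → Spec_check s t (check s t)
def Claim_changed_check : Prop := Dom_check (pvDiffWitness_check.1) (pvDiffWitness_check.2) ∧ D_check (pvDiffWitness_check.1) (pvDiffWitness_check.2) ∧ check (pvDiffWitness_check.1) (pvDiffWitness_check.2) = pvDiffWitnessOut_check.1 ∧ check_alt (pvDiffWitness_check.1) (pvDiffWitness_check.2) = pvDiffWitnessOut_check.2 ∧ pvDiffWitnessOut_check.1 ≠ pvDiffWitnessOut_check.2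
def Claim_exact_check : Prop := ∀ (s : String) (t : String), Dom_check s t → D_check s t → check s t ≠ check_alt s t

-- ===== LEMMAS AND PROOFS =====

theorem isMhyB_not_nonMhy : (fun c : Char => !isMhyB c) = nonMhy := by
  funext c
  simp [isMhyB, nonMhy, List.contains_cons]
  by_cases h1 : c = 'm' <;> by_cases h2 : c = 'h' <;> by_cases h3 : c = 'y' <;> simp_all

theorem isMhyB_eq (c : Char) : isMhyB c = !nonMhy c := by
  have := congrFun isMhyB_not_nonMhy c
  simp only at this
  rw [← this, Bool.not_not]

-- canonical form of A's prefix-checking loops (explicit three counters, A's exact condition)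
def prefA3 : List Char → Int → Int → Int → Bool
  | [], _, _, _ => true
  | c :: rest, m, h, y =>
    if c = 'm' then (if h > m + 1 || y > h || y > m + 1 then false else prefA3 rest (m + 1) h y)
    else if c = 'h' then (if h + 1 > m || y > h + 1 || y > m then false else prefA3 rest m (h + 1) y)
    else if c = 'y' then (if h > m || y + 1 > h || y + 1 > m then false else prefA3 rest m h (y + 1))
    else prefA3 rest m h y

-- proof-side canonical validator (B's _mhy_run test plus final balance, explicit counters)
def stepB (c : Char) (m h y : Int) : Option (Int × Int × Int) :=
  if c == 'm' then some (m + 1, h, y)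
  else if c == 'h' then some (m, h + 1, y)
  else if c == 'y' then some (m, h, y + 1)
  else none

def mhySeqOkB : List Char → Int → Int → Int → Bool
  | [], m, h, y => m == h && h == y
  | c :: rest, m, h, y =>
    match stepB c m h y with
    | none => false
    | some (m', h', y') => if h' > m' || y' > h' then false else mhySeqOkB rest m' h' y'

theorem getD_foldl_sub (K : List Char) (v : Char → Int) (c1 r : PySem.Dict Char Int) (k : Char)
    (hnd : K.Nodup) (hk : k ∈ K → r.getD k 0 = 0) :
    ((K.map (fun a => (a, v a))).foldl
        (fun r kv => if 0 < kv.2 - c1.getD kv.1 0 then r.insert kv.1 (kv.2 - c1.getD kv.1 0) else r)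
        r).getD k 0 =
      if k ∈ K then (if 0 < v k - c1.getD k 0 then v k - c1.getD k 0 else 0) else r.getD k 0 := by
  induction K generalizing r with
  | nil => simp
  | cons a K ih =>
    simp only [List.map_cons, List.foldl_cons, List.nodup_cons] at *
    rcases hnd with ⟨ha, hnd⟩
    by_cases hka : k = a
    · subst hka
      have hk0 : r.getD k 0 = 0 := hk (by simp)
      by_cases hc : 0 < v k - c1.getD k 0
      · simp only [hc, if_pos]
        rw [ih _ hnd (fun hm => absurd hm ha)]
        simp [ha, hc, PySem.Dict.getD_insert_self]
      · simp only [hc, if_neg, if_false]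
        rw [ih _ hnd (fun hm => absurd hm ha)]
        simp [ha, hc, hk0]
    · have step : ∀ (r' : PySem.Dict Char Int),
          ((if 0 < v a - c1.getD a 0 then r'.insert a (v a - c1.getD a 0) else r')).getD k 0 =
            r'.getD k 0 := by
        intro r'
        split
        · exact PySem.Dict.getD_insert_of_ne _ _ _ hka
        · rfl
      by_cases hmem : k ∈ K
      · rw [ih _ hnd (fun _ => by rw [step]; exact hk (by simp [hmem]))]
        simp [hmem, hka]
      · rw [ih _ hnd (fun hm => absurd hm hmem)]
        have hkc : k ∉ a :: K := by simp [hka, hmem]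
        simp only [hkc, if_false, hmem]
        split
        · exact PySem.Dict.getD_insert_of_ne _ _ _ hka
        · rfl

theorem mem_keys_foldl_sub (K : List Char) (v : Char → Int) (c1 r : PySem.Dict Char Int) (k : Char) :
    k ∈ ((K.map (fun a => (a, v a))).foldl
        (fun r kv => if 0 < kv.2 - c1.getD kv.1 0 then r.insert kv.1 (kv.2 - c1.getD kv.1 0) else r)
        r).keys ↔
      ((k ∈ K ∧ 0 < v k - c1.getD k 0) ∨ k ∈ r.keys) := by
  induction K generalizing r with
  | nil => simp
  | cons a K ih =>
    simp only [List.map_cons, List.foldl_cons]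
    rw [ih]
    by_cases hc : 0 < v a - c1.getD a 0
    · simp only [hc, if_pos]
      rw [PySem.Dict.mem_keys_insert]
      constructor
      · rintro (⟨hK, hv⟩ | (rfl | hr))
        · exact Or.inl ⟨by simp [hK], hv⟩
        · exact Or.inl ⟨by simp, hc⟩
        · exact Or.inr hr
      · rintro (⟨hK, hv⟩ | hr)
        · rcases List.mem_cons.1 hK with rfl | hK
          · exact Or.inr (Or.inl rfl)
          · exact Or.inl ⟨hK, hv⟩
        · exact Or.inr (Or.inr hr)
    · simp only [hc, if_neg, if_false]
      constructor
      · rintro (⟨hK, hv⟩ | hr)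
        · exact Or.inl ⟨by simp [hK], hv⟩
        · exact Or.inr hr
      · rintro (⟨hK, hv⟩ | hr)
        · rcases List.mem_cons.1 hK with rfl | hK
          · exact absurd hv hc
          · exact Or.inl ⟨hK, hv⟩
        · exact Or.inr hr

theorem getD_counterSub (sl tl : List Char) (k : Char) :
    (counterSub (PySem.Dict.counter tl) (PySem.Dict.counter sl)).getD k 0 =
      max ((tl.count k : Int) - (sl.count k : Int)) 0 := by
  rw [counterSub, PySem.Dict.items_counter,
    getD_foldl_sub _ _ _ _ _ (PySem.Set.nodup_ofList tl) (fun _ => PySem.Dict.getD_empty _ _)]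
  by_cases hm : k ∈ tl
  · simp only [PySem.Set.mem_ofList, hm, if_pos, PySem.Dict.getD_counter]
    omega
  · have h0 : tl.count k = 0 := List.count_eq_zero.2 hm
    simp only [PySem.Set.mem_ofList, hm, if_false, PySem.Dict.getD_empty, h0]
    have : (0 : Int) ≤ (sl.count k : Int) := by positivity
    omega

theorem mem_keys_counterSub (sl tl : List Char) (k : Char) :
    k ∈ (counterSub (PySem.Dict.counter tl) (PySem.Dict.counter sl)).keys ↔
      ((sl.count k : Int) < (tl.count k : Int)) := by
  rw [counterSub, PySem.Dict.items_counter, mem_keys_foldl_sub]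
  simp only [PySem.Dict.keys_empty, List.not_mem_nil, or_false, PySem.Set.mem_ofList,
    PySem.Dict.getD_counter]
  constructor
  · rintro ⟨_, hv⟩; omega
  · intro hv
    refine ⟨List.count_pos_iff.1 ?_, by omega⟩
    have : (0 : Int) ≤ (sl.count k : Int) := by positivity
    omega

theorem keysAll_iff (sl tl : List Char) :
    ((counterSub (PySem.Dict.counter tl) (PySem.Dict.counter sl)).keys.all
        (fun k => ['m', 'h', 'y'].contains k) = true) ↔
      ∀ k : Char, (sl.count k : Int) < tl.count k → (k = 'm' ∨ k = 'h' ∨ k = 'y') := by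
  rw [List.all_eq_true]
  constructor
  · intro hall k hk
    have := hall k ((mem_keys_counterSub sl tl k).2 hk)
    simpa using this
  · intro hP k hkmem
    have := (mem_keys_counterSub sl tl k).1 hkmem
    rcases hP k this with rfl | rfl | rfl <;> decide

theorem ffA_iff (sl tl : List Char) :
    ffA sl tl = true ↔
      ((∀ k : Char, (sl.count k : Int) < tl.count k → (k = 'm' ∨ k = 'h' ∨ k = 'y')) ∧
       (max ((tl.count 'm' : Int) - sl.count 'm') 0 = max ((tl.count 'h' : Int) - sl.count 'h') 0 ∧
        max ((tl.count 'h' : Int) - sl.count 'h') 0 = max ((tl.count 'y' : Int) - sl.count 'y') 0)) := by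
  simp only [ffA]
  by_cases hK : (counterSub (PySem.Dict.counter tl) (PySem.Dict.counter sl)).keys.all
      (fun k => ['m', 'h', 'y'].contains k) = true
  · rw [if_pos hK]
    simp only [Bool.and_eq_true, beq_iff_eq, getD_counterSub]
    constructor
    · rintro ⟨e1, e2⟩; exact ⟨(keysAll_iff sl tl).1 hK, e1, e2⟩
    · rintro ⟨-, e1, e2⟩; exact ⟨e1, e2⟩
  · rw [if_neg hK]
    simp only [Bool.false_eq_true, false_iff]
    rintro ⟨hP1, -⟩
    exact hK ((keysAll_iff sl tl).2 hP1)

theorem fLoopA_snd (cs : List Char) (buc : PySem.Dict Char Int) (rem : List Char) :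
    (fLoopA cs buc rem).2 = prefA3 cs (buc.getD 'm' 0) (buc.getD 'h' 0) (buc.getD 'y' 0) := by
  induction cs generalizing buc rem with
  | nil => simp [fLoopA, prefA3]
  | cons c rest ih =>
    by_cases hm : c = 'm'
    · subst hm
      conv_lhs => rw [fLoopA]
      conv_rhs => rw [prefA3]
      simp only [PySem.Dict.getD_modify, show (('h' : Char) = 'm') = False from by simp,
        show (('y' : Char) = 'm') = False from by simp, eq_self_iff_true, if_true, if_false,
        show (['m', 'h', 'y'].contains 'm') = true from by decide]
      rw [apply_ite Prod.snd]
      simp only [ih, PySem.Dict.getD_modify, show (('h' : Char) = 'm') = False from by simp,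
        show (('y' : Char) = 'm') = False from by simp, eq_self_iff_true, if_true, if_false]
    · by_cases hh : c = 'h'
      · subst hh
        conv_lhs => rw [fLoopA]
        conv_rhs => rw [prefA3]
        simp only [PySem.Dict.getD_modify, show (('m' : Char) = 'h') = False from by simp,
          show (('y' : Char) = 'h') = False from by simp,
          show (('h' : Char) = 'm') = False from by simp, eq_self_iff_true, if_true, if_false,
          show (['m', 'h', 'y'].contains 'h') = true from by decide]
        rw [apply_ite Prod.snd]
        simp only [ih, PySem.Dict.getD_modify, show (('m' : Char) = 'h') = False from by simp,
          show (('y' : Char) = 'h') = False from by simp,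
          show (('h' : Char) = 'm') = False from by simp, eq_self_iff_true, if_true, if_false]
      · by_cases hy : c = 'y'
        · subst hy
          conv_lhs => rw [fLoopA]
          conv_rhs => rw [prefA3]
          simp only [PySem.Dict.getD_modify, show (('m' : Char) = 'y') = False from by simp,
            show (('h' : Char) = 'y') = False from by simp,
            show (('y' : Char) = 'm') = False from by simp,
            show (('y' : Char) = 'h') = False from by simp, eq_self_iff_true, if_true, if_false,
            show (['m', 'h', 'y'].contains 'y') = true from by decide]
          rw [apply_ite Prod.snd]
          simp only [ih, PySem.Dict.getD_modify, show (('m' : Char) = 'y') = False from by simp,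
            show (('h' : Char) = 'y') = False from by simp,
            show (('y' : Char) = 'm') = False from by simp,
            show (('y' : Char) = 'h') = False from by simp, eq_self_iff_true, if_true, if_false]
        · have hc : (['m', 'h', 'y'].contains c) = false := by simp [hm, hh, hy]
          conv_lhs => rw [fLoopA]
          conv_rhs => rw [prefA3]
          simp only [hc, if_neg hm, if_neg hh, if_neg hy, Bool.false_eq_true, if_false, ih]

theorem fLoopA_fst (cs : List Char) (buc : PySem.Dict Char Int) (rem : List Char)
    (h : prefA3 cs (buc.getD 'm' 0) (buc.getD 'h' 0) (buc.getD 'y' 0) = true) :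
    (fLoopA cs buc rem).1 = rem ++ cs.filter nonMhy := by
  induction cs generalizing buc rem with
  | nil => simp [fLoopA]
  | cons c rest ih =>
    by_cases hm : c = 'm'
    · subst hm
      rw [prefA3] at h
      simp only [eq_self_iff_true, if_true] at h
      conv_lhs => rw [fLoopA]
      rw [if_pos (show (['m', 'h', 'y'].contains 'm') = true by decide)]
      by_cases hcond : (buc.getD 'h' 0 > buc.getD 'm' 0 + 1 || buc.getD 'y' 0 > buc.getD 'h' 0 ||
          buc.getD 'y' 0 > buc.getD 'm' 0 + 1) = true
      · rw [if_pos hcond] at h; exact absurd h (by simp)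
      · rw [if_neg hcond] at h
        have hA : ((buc.modify 'm' 0 (· + 1)).getD 'h' 0 > (buc.modify 'm' 0 (· + 1)).getD 'm' 0 ||
            (buc.modify 'm' 0 (· + 1)).getD 'y' 0 > (buc.modify 'm' 0 (· + 1)).getD 'h' 0 ||
            (buc.modify 'm' 0 (· + 1)).getD 'y' 0 > (buc.modify 'm' 0 (· + 1)).getD 'm' 0) =
            (buc.getD 'h' 0 > buc.getD 'm' 0 + 1 || buc.getD 'y' 0 > buc.getD 'h' 0 ||
             buc.getD 'y' 0 > buc.getD 'm' 0 + 1) := by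
          simp [PySem.Dict.getD_modify]
        rw [if_neg (by rw [hA]; exact hcond)]
        rw [ih _ rem (by simp only [PySem.Dict.getD_modify,
          show (('h' : Char) = 'm') = False from by simp,
          show (('y' : Char) = 'm') = False from by simp, eq_self_iff_true, if_true, if_false]; exact h)]
        simp [nonMhy]
    · by_cases hh : c = 'h'
      · subst hh
        rw [prefA3] at h
        simp only [show (('h' : Char) = 'm') = False from by simp, eq_self_iff_true, if_true,
          if_false] at h
        conv_lhs => rw [fLoopA]
        rw [if_pos (show (['m', 'h', 'y'].contains 'h') = true by decide)]
        by_cases hcond : (buc.getD 'h' 0 + 1 > buc.getD 'm' 0 || buc.getD 'y' 0 > buc.getD 'h' 0 + 1 ||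
            buc.getD 'y' 0 > buc.getD 'm' 0) = true
        · rw [if_pos hcond] at h; exact absurd h (by simp)
        · rw [if_neg hcond] at h
          have hA : ((buc.modify 'h' 0 (· + 1)).getD 'h' 0 > (buc.modify 'h' 0 (· + 1)).getD 'm' 0 ||
              (buc.modify 'h' 0 (· + 1)).getD 'y' 0 > (buc.modify 'h' 0 (· + 1)).getD 'h' 0 ||
              (buc.modify 'h' 0 (· + 1)).getD 'y' 0 > (buc.modify 'h' 0 (· + 1)).getD 'm' 0) =
              (buc.getD 'h' 0 + 1 > buc.getD 'm' 0 || buc.getD 'y' 0 > buc.getD 'h' 0 + 1 ||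
               buc.getD 'y' 0 > buc.getD 'm' 0) := by
            simp [PySem.Dict.getD_modify]
          rw [if_neg (by rw [hA]; exact hcond)]
          rw [ih _ rem (by simp only [PySem.Dict.getD_modify,
            show (('m' : Char) = 'h') = False from by simp,
            show (('y' : Char) = 'h') = False from by simp, eq_self_iff_true, if_true, if_false]; exact h)]
          simp [nonMhy]
      · by_cases hy : c = 'y'
        · subst hy
          rw [prefA3] at h
          simp only [show (('y' : Char) = 'm') = False from by simp,
            show (('y' : Char) = 'h') = False from by simp, eq_self_iff_true, if_true, if_false] at h
          conv_lhs => rw [fLoopA]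
          rw [if_pos (show (['m', 'h', 'y'].contains 'y') = true by decide)]
          by_cases hcond : (buc.getD 'h' 0 > buc.getD 'm' 0 || buc.getD 'y' 0 + 1 > buc.getD 'h' 0 ||
              buc.getD 'y' 0 + 1 > buc.getD 'm' 0) = true
          · rw [if_pos hcond] at h; exact absurd h (by simp)
          · rw [if_neg hcond] at h
            have hA : ((buc.modify 'y' 0 (· + 1)).getD 'h' 0 > (buc.modify 'y' 0 (· + 1)).getD 'm' 0 ||
                (buc.modify 'y' 0 (· + 1)).getD 'y' 0 > (buc.modify 'y' 0 (· + 1)).getD 'h' 0 ||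
                (buc.modify 'y' 0 (· + 1)).getD 'y' 0 > (buc.modify 'y' 0 (· + 1)).getD 'm' 0) =
                (buc.getD 'h' 0 > buc.getD 'm' 0 || buc.getD 'y' 0 + 1 > buc.getD 'h' 0 ||
                 buc.getD 'y' 0 + 1 > buc.getD 'm' 0) := by
              simp [PySem.Dict.getD_modify]
            rw [if_neg (by rw [hA]; exact hcond)]
            rw [ih _ rem (by simp only [PySem.Dict.getD_modify,
              show (('m' : Char) = 'y') = False from by simp,
              show (('h' : Char) = 'y') = False from by simp, eq_self_iff_true, if_true, if_false]; exact h)]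
            simp [nonMhy]
        · rw [prefA3] at h
          rw [if_neg hm, if_neg hh, if_neg hy] at h
          conv_lhs => rw [fLoopA]
          rw [if_neg (by simp [hm, hh, hy])]
          rw [ih _ (rem ++ [c]) h]
          have : nonMhy c = true := by simp [nonMhy, hm, hh, hy]
          simp [this, List.append_assoc]

theorem prefLoopA_eq (cs : List Char) (buc : PySem.Dict Char Int)
    (hhm : buc.getD 'h' 0 ≤ buc.getD 'm' 0) (hyh : buc.getD 'y' 0 ≤ buc.getD 'h' 0) :
    prefLoopA cs buc = prefA3 cs (buc.getD 'm' 0) (buc.getD 'h' 0) (buc.getD 'y' 0) := by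
  induction cs generalizing buc with
  | nil => simp [prefLoopA, prefA3]
  | cons c rest ih =>
    by_cases hm : c = 'm'
    · subst hm
      conv_lhs => rw [prefLoopA]
      conv_rhs => rw [prefA3]
      simp only [PySem.Dict.getD_modify, show (('h' : Char) = 'm') = False from by simp,
        show (('y' : Char) = 'm') = False from by simp, eq_self_iff_true, if_true, if_false]
      by_cases hcond : (buc.getD 'h' 0 > buc.getD 'm' 0 + 1 ∨ buc.getD 'y' 0 > buc.getD 'h' 0 ∨
          buc.getD 'y' 0 > buc.getD 'm' 0 + 1)
      · have : (buc.getD 'h' 0 > buc.getD 'm' 0 + 1 || buc.getD 'y' 0 > buc.getD 'h' 0 ||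
            buc.getD 'y' 0 > buc.getD 'm' 0 + 1) = true := by
          simp only [Bool.or_eq_true, decide_eq_true_eq]; tauto
        rw [if_pos this, if_pos this]
      · have : (buc.getD 'h' 0 > buc.getD 'm' 0 + 1 || buc.getD 'y' 0 > buc.getD 'h' 0 ||
            buc.getD 'y' 0 > buc.getD 'm' 0 + 1) = false := by
          simp only [Bool.or_eq_false_iff, decide_eq_false_iff_not]; push_neg at hcond ⊢; omega
        rw [if_neg (by rw [this]; simp), if_neg (by rw [this]; simp)]
        rw [ih _ (by simp [PySem.Dict.getD_modify]; push Not at hcond; omega) (by simp [PySem.Dict.getD_modify]; push Not at hcond; omega)]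
        simp only [PySem.Dict.getD_modify, show (('h' : Char) = 'm') = False from by simp,
          show (('y' : Char) = 'm') = False from by simp, eq_self_iff_true, if_true, if_false]
    · by_cases hh : c = 'h'
      · subst hh
        conv_lhs => rw [prefLoopA]
        conv_rhs => rw [prefA3]
        simp only [PySem.Dict.getD_modify, show (('m' : Char) = 'h') = False from by simp,
          show (('y' : Char) = 'h') = False from by simp,
          show (('h' : Char) = 'm') = False from by simp, eq_self_iff_true, if_true, if_false]
        by_cases hcond : (buc.getD 'h' 0 + 1 > buc.getD 'm' 0 ∨ buc.getD 'y' 0 > buc.getD 'h' 0 + 1 ∨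
            buc.getD 'y' 0 > buc.getD 'm' 0)
        · have : (buc.getD 'h' 0 + 1 > buc.getD 'm' 0 || buc.getD 'y' 0 > buc.getD 'h' 0 + 1 ||
              buc.getD 'y' 0 > buc.getD 'm' 0) = true := by
            simp only [Bool.or_eq_true, decide_eq_true_eq]; tauto
          rw [if_pos this, if_pos this]
        · have : (buc.getD 'h' 0 + 1 > buc.getD 'm' 0 || buc.getD 'y' 0 > buc.getD 'h' 0 + 1 ||
              buc.getD 'y' 0 > buc.getD 'm' 0) = false := by
            simp only [Bool.or_eq_false_iff, decide_eq_false_iff_not]; push_neg at hcond ⊢; omega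
          rw [if_neg (by rw [this]; simp), if_neg (by rw [this]; simp)]
          rw [ih _ (by simp [PySem.Dict.getD_modify]; push Not at hcond; omega) (by simp [PySem.Dict.getD_modify]; push Not at hcond; omega)]
          simp only [PySem.Dict.getD_modify, show (('m' : Char) = 'h') = False from by simp,
            show (('y' : Char) = 'h') = False from by simp,
            show (('h' : Char) = 'm') = False from by simp, eq_self_iff_true, if_true, if_false]
      · by_cases hy : c = 'y'
        · subst hy
          conv_lhs => rw [prefLoopA]
          conv_rhs => rw [prefA3]
          simp only [PySem.Dict.getD_modify, show (('m' : Char) = 'y') = False from by simp,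
            show (('h' : Char) = 'y') = False from by simp,
            show (('y' : Char) = 'm') = False from by simp,
            show (('y' : Char) = 'h') = False from by simp, eq_self_iff_true, if_true, if_false]
          by_cases hcond : (buc.getD 'h' 0 > buc.getD 'm' 0 ∨ buc.getD 'y' 0 + 1 > buc.getD 'h' 0 ∨
              buc.getD 'y' 0 + 1 > buc.getD 'm' 0)
          · have : (buc.getD 'h' 0 > buc.getD 'm' 0 || buc.getD 'y' 0 + 1 > buc.getD 'h' 0 ||
                buc.getD 'y' 0 + 1 > buc.getD 'm' 0) = true := by
              simp only [Bool.or_eq_true, decide_eq_true_eq]; tauto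
            rw [if_pos this, if_pos this]
          · have : (buc.getD 'h' 0 > buc.getD 'm' 0 || buc.getD 'y' 0 + 1 > buc.getD 'h' 0 ||
                buc.getD 'y' 0 + 1 > buc.getD 'm' 0) = false := by
              simp only [Bool.or_eq_false_iff, decide_eq_false_iff_not]; push_neg at hcond ⊢; omega
            rw [if_neg (by rw [this]; simp), if_neg (by rw [this]; simp)]
            rw [ih _ (by simp [PySem.Dict.getD_modify]; push Not at hcond; omega) (by simp [PySem.Dict.getD_modify]; push Not at hcond; omega)]
            simp only [PySem.Dict.getD_modify, show (('m' : Char) = 'y') = False from by simp,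
              show (('h' : Char) = 'y') = False from by simp,
              show (('y' : Char) = 'm') = False from by simp,
              show (('y' : Char) = 'h') = False from by simp, eq_self_iff_true, if_true, if_false]
        · conv_lhs => rw [prefLoopA]
          conv_rhs => rw [prefA3]
          simp only [PySem.Dict.getD_modify, if_neg (Ne.symm hm), if_neg (Ne.symm hh),
            if_neg (Ne.symm hy), if_neg hm, if_neg hh, if_neg hy]
          have : (buc.getD 'h' 0 > buc.getD 'm' 0 || buc.getD 'y' 0 > buc.getD 'h' 0 ||
              buc.getD 'y' 0 > buc.getD 'm' 0) = false := by
            simp only [Bool.or_eq_false_iff, decide_eq_false_iff_not]; omega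
          rw [if_neg (by rw [this]; simp)]
          rw [ih _ (by simp [PySem.Dict.getD_modify, if_neg (Ne.symm hm), if_neg (Ne.symm hh)]; omega)
            (by simp [PySem.Dict.getD_modify, if_neg (Ne.symm hh), if_neg (Ne.symm hy)]; omega)]
          simp only [PySem.Dict.getD_modify, if_neg (Ne.symm hm), if_neg (Ne.symm hh),
            if_neg (Ne.symm hy)]

theorem mhySeqOkB_spec (cs : List Char) (m h y : Int) (hhm : h ≤ m) (hyh : y ≤ h) :
    mhySeqOkB cs m h y =
      (cs.all (fun c => !nonMhy c) && prefA3 cs m h y &&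
        (decide (m + cs.count 'm' = h + cs.count 'h') &&
         decide (h + cs.count 'h' = y + cs.count 'y'))) := by
  induction cs generalizing m h y with
  | nil =>
    rw [Bool.eq_iff_iff]
    simp [mhySeqOkB, prefA3]
  | cons c rest ih =>
    by_cases hm : c = 'm'
    · subst hm
      have hp : ∀ (P : Bool), (h > m + 1 || y > h || y > m + 1) = P →
          prefA3 ('m' :: rest) m h y = if P then false else prefA3 rest (m + 1) (h) (y) := by
        intro P hP
        rw [prefA3]
        simp only [eq_self_iff_true, if_true,
          show (('h' : Char) = 'm') = False from by simp,
          show (('y' : Char) = 'm') = False from by simp,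
          show (('y' : Char) = 'h') = False from by simp, if_false, hP]
      conv_lhs => rw [mhySeqOkB]
      simp only [stepB, beq_self_eq_true, if_true]
      by_cases hcond : (h > m + 1  ∨  y > h)
      · have hb : (h > m + 1 || y > h) = true := by
          simp only [Bool.or_eq_true, decide_eq_true_eq]; tauto
        rw [hp true (by simp only [Bool.or_eq_true, decide_eq_true_eq]; tauto)]
        rw [if_pos hb]
        simp
      · have hb : (h > m + 1 || y > h) = false := by
          simp only [Bool.or_eq_false_iff, decide_eq_false_iff_not]; omega
        rw [hp false (by simp only [Bool.or_eq_false_iff, decide_eq_false_iff_not]; omega)]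
        rw [if_neg (by rw [hb]; simp)]
        rw [ih (m + 1) (h) (y) (by omega) (by omega)]
        have hnc : (!nonMhy 'm') = true := by simp [nonMhy]
        simp only [List.count_cons, List.all_cons, hnc, Bool.true_and]
        simp only [beq_self_eq_true, if_true, show (('m' : Char) == 'h') = false from by decide,
          show (('m' : Char) == 'y') = false from by decide, if_false, Bool.false_eq_true, Nat.add_zero]
        have e1 : decide (m + 1 + (rest.count 'm' : Int) = h + (rest.count 'h' : Int)) =
            decide (m + ((rest.count 'm' + 1 : Nat) : Int) = h + (rest.count 'h' : Int)) :=
          decide_eq_decide.mpr (by push_cast; omega)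
        rw [← e1]
    · by_cases hh : c = 'h'
      · subst hh
        have hp : ∀ (P : Bool), (h + 1 > m || y > h + 1 || y > m) = P →
            prefA3 ('h' :: rest) m h y = if P then false else prefA3 rest (m) (h + 1) (y) := by
          intro P hP
          rw [prefA3]
          simp only [eq_self_iff_true, if_true,
            show (('h' : Char) = 'm') = False from by simp,
            show (('y' : Char) = 'm') = False from by simp,
            show (('y' : Char) = 'h') = False from by simp, if_false, hP]
        conv_lhs => rw [mhySeqOkB]
        simp only [stepB, beq_self_eq_true, if_true,
            show (('h' : Char) == 'm') = false from by decide, if_false, Bool.false_eq_true]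
        by_cases hcond : (h + 1 > m  ∨  y > h + 1)
        · have hb : (h + 1 > m || y > h + 1) = true := by
            simp only [Bool.or_eq_true, decide_eq_true_eq]; tauto
          rw [hp true (by simp only [Bool.or_eq_true, decide_eq_true_eq]; tauto)]
          rw [if_pos hb]
          simp
        · have hb : (h + 1 > m || y > h + 1) = false := by
            simp only [Bool.or_eq_false_iff, decide_eq_false_iff_not]; omega
          rw [hp false (by simp only [Bool.or_eq_false_iff, decide_eq_false_iff_not]; omega)]
          rw [if_neg (by rw [hb]; simp)]
          rw [ih (m) (h + 1) (y) (by omega) (by omega)]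
          have hnc : (!nonMhy 'h') = true := by simp [nonMhy]
          simp only [List.count_cons, List.all_cons, hnc, Bool.true_and]
          simp only [beq_self_eq_true, if_true, show (('h' : Char) == 'm') = false from by decide,
            show (('h' : Char) == 'y') = false from by decide, if_false, Bool.false_eq_true, Nat.add_zero]
          have e1 : decide (m + (rest.count 'm' : Int) = h + 1 + (rest.count 'h' : Int)) =
              decide (m + (rest.count 'm' : Int) = h + ((rest.count 'h' + 1 : Nat) : Int)) :=
            decide_eq_decide.mpr (by push_cast; omega)
          have e2 : decide (h + 1 + (rest.count 'h' : Int) = y + (rest.count 'y' : Int)) =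
              decide (h + ((rest.count 'h' + 1 : Nat) : Int) = y + (rest.count 'y' : Int)) :=
            decide_eq_decide.mpr (by push_cast; omega)
          rw [← e1, ← e2]
      · by_cases hy : c = 'y'
        · subst hy
          have hp : ∀ (P : Bool), (h > m || y + 1 > h || y + 1 > m) = P →
              prefA3 ('y' :: rest) m h y = if P then false else prefA3 rest (m) (h) (y + 1) := by
            intro P hP
            rw [prefA3]
            simp only [eq_self_iff_true, if_true,
              show (('h' : Char) = 'm') = False from by simp,
              show (('y' : Char) = 'm') = False from by simp,
              show (('y' : Char) = 'h') = False from by simp, if_false, hP]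
          conv_lhs => rw [mhySeqOkB]
          simp only [stepB, beq_self_eq_true, if_true,
              show (('y' : Char) == 'm') = false from by decide,
              show (('y' : Char) == 'h') = false from by decide, if_false, Bool.false_eq_true]
          by_cases hcond : (h > m  ∨  y + 1 > h)
          · have hb : (h > m || y + 1 > h) = true := by
              simp only [Bool.or_eq_true, decide_eq_true_eq]; tauto
            rw [hp true (by simp only [Bool.or_eq_true, decide_eq_true_eq]; tauto)]
            rw [if_pos hb]
            simp
          · have hb : (h > m || y + 1 > h) = false := by
              simp only [Bool.or_eq_false_iff, decide_eq_false_iff_not]; omega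
            rw [hp false (by simp only [Bool.or_eq_false_iff, decide_eq_false_iff_not]; omega)]
            rw [if_neg (by rw [hb]; simp)]
            rw [ih (m) (h) (y + 1) (by omega) (by omega)]
            have hnc : (!nonMhy 'y') = true := by simp [nonMhy]
            simp only [List.count_cons, List.all_cons, hnc, Bool.true_and]
            simp only [beq_self_eq_true, if_true, show (('y' : Char) == 'm') = false from by decide,
              show (('y' : Char) == 'h') = false from by decide, if_false, Bool.false_eq_true, Nat.add_zero]
            have e2 : decide (h + (rest.count 'h' : Int) = y + 1 + (rest.count 'y' : Int)) =
                decide (h + (rest.count 'h' : Int) = y + ((rest.count 'y' + 1 : Nat) : Int)) :=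
              decide_eq_decide.mpr (by push_cast; omega)
            rw [← e2]
        · have hs : stepB c m h y = none := by simp [stepB, hm, hh, hy]
          conv_lhs => rw [mhySeqOkB]
          simp only [hs]
          have hnc : (!nonMhy c) = false := by simp [nonMhy, hm, hh, hy]
          simp [hnc]

theorem count_mhy_le_length (cs : List Char) :
    cs.count 'm' + cs.count 'h' + cs.count 'y' ≤ cs.length := by
  induction cs with
  | nil => simp
  | cons d ds ihd =>
    simp only [List.count_cons, List.length_cons]
    by_cases hdm : d = 'm' <;> by_cases hdh : d = 'h' <;> by_cases hdy : d = 'y' <;>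
      simp_all <;> omega

theorem count_sum_eq_length_iff (cs : List Char) :
    (cs.count 'm' + cs.count 'h' + cs.count 'y' = cs.length) ↔ cs.all (fun c => !nonMhy c) = true := by
  induction cs with
  | nil => simp
  | cons c rest ih =>
    have hle := count_mhy_le_length rest
    simp only [List.count_cons, List.length_cons, List.all_cons, Bool.and_eq_true]
    by_cases hm : c = 'm'
    · subst hm
      simp only [beq_self_eq_true, if_true, show (('m' : Char) == 'h') = false from by decide,
        show (('m' : Char) == 'y') = false from by decide, if_false, Bool.false_eq_true,
        Nat.add_zero]
      constructor
      · intro hs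
        exact ⟨by simp [nonMhy], ih.1 (by omega)⟩
      · rintro ⟨-, hall⟩
        have := ih.2 hall
        omega
    · by_cases hh : c = 'h'
      · subst hh
        simp only [beq_self_eq_true, if_true, show (('h' : Char) == 'm') = false from by decide,
          show (('h' : Char) == 'y') = false from by decide, if_false, Bool.false_eq_true,
          Nat.add_zero]
        constructor
        · intro hs
          exact ⟨by simp [nonMhy], ih.1 (by omega)⟩
        · rintro ⟨-, hall⟩
          have := ih.2 hall
          omega
      · by_cases hy : c = 'y'
        · subst hy
          simp only [beq_self_eq_true, if_true, show (('y' : Char) == 'm') = false from by decide,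
            show (('y' : Char) == 'h') = false from by decide, if_false, Bool.false_eq_true,
            Nat.add_zero]
          constructor
          · intro hs
            exact ⟨by simp [nonMhy], ih.1 (by omega)⟩
          · rintro ⟨-, hall⟩
            have := ih.2 hall
            omega
        · have hcm : ('m' == c) = false := by simp [Ne.symm hm]
          have hch : ('h' == c) = false := by simp [Ne.symm hh]
          have hcy : ('y' == c) = false := by simp [Ne.symm hy]
          have hcm2 : (c == 'm') = false := by simp [hm]
          have hch2 : (c == 'h') = false := by simp [hh]
          have hcy2 : (c == 'y') = false := by simp [hy]
          simp only [hcm, hch, hcy, hcm2, hch2, hcy2, if_false, Bool.false_eq_true, Nat.add_zero]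
          constructor
          · intro hs
            omega
          · rintro ⟨hc, -⟩
            exact absurd hc (by simp [nonMhy, hm, hh, hy])

theorem whileA_nil (si diff : List Char) : whileA si [] diff = (si, [], diff) := by
  cases si <;> simp [whileA]

theorem whileA_nil_left (tj diff : List Char) : whileA [] tj diff = ([], tj, diff) := by
  cases tj <;> simp [whileA]

theorem prefA3_iff (cs : List Char) (m h y : Int) (hhm : h ≤ m) (hyh : y ≤ h) :
    prefA3 cs m h y = true ↔
      ∀ n : Nat, h + ((cs.take n).count 'h' : Int) ≤ m + ((cs.take n).count 'm' : Int) ∧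
        y + ((cs.take n).count 'y' : Int) ≤ h + ((cs.take n).count 'h' : Int) := by
  induction cs generalizing m h y with
  | nil =>
    simp only [List.take_nil, List.count_nil, Nat.cast_zero, add_zero]
    constructor
    · intro _ _; exact ⟨hhm, hyh⟩
    · intro _; rfl
  | cons c rest ih =>
    by_cases hm : c = 'm'
    · subst hm
      have hp : ∀ (P : Bool), (h > m + 1 || y > h || y > m + 1) = P →
          prefA3 ('m' :: rest) m h y = if P then false else prefA3 rest (m + 1) (h) (y) := by
        intro P hP
        rw [prefA3]
        simp only [eq_self_iff_true, if_true,
          show (('h' : Char) = 'm') = False from by simp,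
          show (('y' : Char) = 'm') = False from by simp,
          show (('y' : Char) = 'h') = False from by simp, if_false, hP]
      by_cases hcond : ((h > m + 1 ∨ y > h))
      · rw [hp true (by simp only [Bool.or_eq_true, decide_eq_true_eq]; tauto)]
        simp only [if_pos, if_true]
        constructor
        · intro habs; exact absurd habs (by simp)
        · intro hall
          have h1 := hall 1
          simp only [List.take_succ_cons, List.take_zero, List.count_cons, List.count_nil,
            beq_self_eq_true, if_true,
        show (('h' : Char) == 'm') = false from by decide,
        show (('y' : Char) == 'm') = false from by decide, if_false, Bool.false_eq_true, Nat.add_zero, List.length_nil] at h1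
          push_cast at h1
          rcases hcond with hc | hc <;> omega
      · rw [hp false (by simp only [Bool.or_eq_false_iff, decide_eq_false_iff_not]; omega)]
        simp only [if_false, Bool.false_eq_true]
        rw [ih (m + 1) (h) (y) (by omega) (by omega)]
        constructor
        · intro hall n
          cases n with
          | zero => simp only [List.take_zero, List.count_nil, Nat.cast_zero, add_zero]; exact ⟨hhm, hyh⟩
          | succ k =>
            have hk := hall k
            simp only [List.take_succ_cons, List.count_cons, beq_self_eq_true, if_true,
        show (('h' : Char) == 'm') = false from by decide,
        show (('y' : Char) == 'm') = false from by decide, if_false, Bool.false_eq_true, Nat.add_zero]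
            push_cast at hk ⊢
            omega
        · intro hall n
          have hk := hall (n + 1)
          simp only [List.take_succ_cons, List.count_cons, beq_self_eq_true, if_true,
        show (('h' : Char) == 'm') = false from by decide,
        show (('y' : Char) == 'm') = false from by decide, if_false, Bool.false_eq_true, Nat.add_zero] at hk
          push_cast at hk ⊢
          omega
    · by_cases hh : c = 'h'
      · subst hh
        have hp : ∀ (P : Bool), (h + 1 > m || y > h + 1 || y > m) = P →
            prefA3 ('h' :: rest) m h y = if P then false else prefA3 rest (m) (h + 1) (y) := by
          intro P hP
          rw [prefA3]
          simp only [eq_self_iff_true, if_true,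
            show (('h' : Char) = 'm') = False from by simp,
            show (('y' : Char) = 'm') = False from by simp,
            show (('y' : Char) = 'h') = False from by simp, if_false, hP]
        by_cases hcond : ((h + 1 > m ∨ y > h + 1))
        · rw [hp true (by simp only [Bool.or_eq_true, decide_eq_true_eq]; tauto)]
          simp only [if_pos, if_true]
          constructor
          · intro habs; exact absurd habs (by simp)
          · intro hall
            have h1 := hall 1
            simp only [List.take_succ_cons, List.take_zero, List.count_cons, List.count_nil,
              beq_self_eq_true, if_true,
        show (('m' : Char) == 'h') = false from by decide,
        show (('y' : Char) == 'h') = false from by decide, if_false, Bool.false_eq_true, Nat.add_zero, List.length_nil] at h1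
            push_cast at h1
            rcases hcond with hc | hc <;> omega
        · rw [hp false (by simp only [Bool.or_eq_false_iff, decide_eq_false_iff_not]; omega)]
          simp only [if_false, Bool.false_eq_true]
          rw [ih (m) (h + 1) (y) (by omega) (by omega)]
          constructor
          · intro hall n
            cases n with
            | zero => simp only [List.take_zero, List.count_nil, Nat.cast_zero, add_zero]; exact ⟨hhm, hyh⟩
            | succ k =>
              have hk := hall k
              simp only [List.take_succ_cons, List.count_cons, beq_self_eq_true, if_true,
        show (('m' : Char) == 'h') = false from by decide,
        show (('y' : Char) == 'h') = false from by decide, if_false, Bool.false_eq_true, Nat.add_zero]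
              push_cast at hk ⊢
              omega
          · intro hall n
            have hk := hall (n + 1)
            simp only [List.take_succ_cons, List.count_cons, beq_self_eq_true, if_true,
        show (('m' : Char) == 'h') = false from by decide,
        show (('y' : Char) == 'h') = false from by decide, if_false, Bool.false_eq_true, Nat.add_zero] at hk
            push_cast at hk ⊢
            omega
      · by_cases hy : c = 'y'
        · subst hy
          have hp : ∀ (P : Bool), (h > m || y + 1 > h || y + 1 > m) = P →
              prefA3 ('y' :: rest) m h y = if P then false else prefA3 rest (m) (h) (y + 1) := by
            intro P hP
            rw [prefA3]
            simp only [eq_self_iff_true, if_true,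
              show (('h' : Char) = 'm') = False from by simp,
              show (('y' : Char) = 'm') = False from by simp,
              show (('y' : Char) = 'h') = False from by simp, if_false, hP]
          by_cases hcond : ((h > m ∨ y + 1 > h))
          · rw [hp true (by simp only [Bool.or_eq_true, decide_eq_true_eq]; tauto)]
            simp only [if_pos, if_true]
            constructor
            · intro habs; exact absurd habs (by simp)
            · intro hall
              have h1 := hall 1
              simp only [List.take_succ_cons, List.take_zero, List.count_cons, List.count_nil,
                beq_self_eq_true, if_true,
        show (('m' : Char) == 'y') = false from by decide,
        show (('h' : Char) == 'y') = false from by decide, if_false, Bool.false_eq_true, Nat.add_zero, List.length_nil] at h1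
              push_cast at h1
              rcases hcond with hc | hc <;> omega
          · rw [hp false (by simp only [Bool.or_eq_false_iff, decide_eq_false_iff_not]; omega)]
            simp only [if_false, Bool.false_eq_true]
            rw [ih (m) (h) (y + 1) (by omega) (by omega)]
            constructor
            · intro hall n
              cases n with
              | zero => simp only [List.take_zero, List.count_nil, Nat.cast_zero, add_zero]; exact ⟨hhm, hyh⟩
              | succ k =>
                have hk := hall k
                simp only [List.take_succ_cons, List.count_cons, beq_self_eq_true, if_true,
        show (('m' : Char) == 'y') = false from by decide,
        show (('h' : Char) == 'y') = false from by decide, if_false, Bool.false_eq_true, Nat.add_zero]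
                push_cast at hk ⊢
                omega
            · intro hall n
              have hk := hall (n + 1)
              simp only [List.take_succ_cons, List.count_cons, beq_self_eq_true, if_true,
        show (('m' : Char) == 'y') = false from by decide,
        show (('h' : Char) == 'y') = false from by decide, if_false, Bool.false_eq_true, Nat.add_zero] at hk
              push_cast at hk ⊢
              omega
        · have hcm2 : (c == ('m' : Char)) = false := by simp [hm]
          have hch2 : (c == ('h' : Char)) = false := by simp [hh]
          have hcy2 : (c == ('y' : Char)) = false := by simp [hy]
          have hp : prefA3 (c :: rest) m h y = prefA3 rest m h y := by
            rw [prefA3, if_neg hm, if_neg hh, if_neg hy]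
          rw [hp, ih m h y hhm hyh]
          constructor
          · intro hall n
            cases n with
            | zero => simp only [List.take_zero, List.count_nil, Nat.cast_zero, add_zero]; exact ⟨hhm, hyh⟩
            | succ k =>
              have hk := hall k
              simp only [List.take_succ_cons, List.count_cons, hcm2, hch2, hcy2, if_false,
                Bool.false_eq_true, Nat.add_zero]
              exact hk
          · intro hall n
            have hk := hall (n + 1)
            simp only [List.take_succ_cons, List.count_cons, hcm2, hch2, hcy2, if_false,
              Bool.false_eq_true, Nat.add_zero] at hk
            exact hk

theorem prefA3_zero_iff (cs : List Char) : prefA3 cs 0 0 0 = mhyPrefixLe cs := by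
  rw [Bool.eq_iff_iff, prefA3_iff cs 0 0 0 le_rfl le_rfl]
  simp only [mhyPrefixLe, List.all_eq_true, List.mem_range, Bool.and_eq_true, decide_eq_true_eq,
    zero_add]
  constructor
  · intro hall n hn
    have := hall n
    omega
  · intro hall n
    by_cases hn : n ≤ cs.length
    · have := hall n (by omega)
      omega
    · have hlen := hall cs.length (by omega)
      rw [List.take_length] at hlen
      rw [List.take_of_length_le (by omega)]
      omega

-- ===== new lemmas relating B's staged filters to A's walk =====

theorem mhyRunB_eq (cs : List Char) (hall : cs.all isMhyB = true) (m h y : Int)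
    (hhm : h ≤ m) (hyh : y ≤ h) :
    mhyRunB cs m h y =
      if prefA3 cs m h y then
        some (m + cs.count 'm', h + cs.count 'h', y + cs.count 'y') else none := by
  induction cs generalizing m h y with
  | nil => simp [mhyRunB, prefA3]
  | cons c rest ih =>
    simp only [List.all_cons, Bool.and_eq_true] at hall
    obtain ⟨hc, hrest⟩ := hall
    by_cases hm : c = 'm'
    · subst hm
      have hp : ∀ (P : Bool), (h > m + 1 || y > h || y > m + 1) = P →
          prefA3 ('m' :: rest) m h y = if P then false else prefA3 rest (m + 1) h y := by
        intro P hP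
        rw [prefA3]
        simp only [eq_self_iff_true, if_true,
          show (('h' : Char) = 'm') = False from by simp,
          show (('y' : Char) = 'm') = False from by simp,
          show (('y' : Char) = 'h') = False from by simp, if_false, hP]
      conv_lhs => rw [mhyRunB]
      simp only [beq_self_eq_true, if_true]
      by_cases hcond : (h > m + 1 ∨ y > h)
      · have hb : (h > m + 1 || y > h) = true := by
          simp only [Bool.or_eq_true, decide_eq_true_eq]; tauto
        rw [hp true (by simp only [Bool.or_eq_true, decide_eq_true_eq]; tauto)]
        rw [if_pos hb]
        simp
      · have hb : (h > m + 1 || y > h) = false := by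
          simp only [Bool.or_eq_false_iff, decide_eq_false_iff_not]; omega
        rw [hp false (by simp only [Bool.or_eq_false_iff, decide_eq_false_iff_not]; omega)]
        rw [if_neg (by rw [hb]; simp)]
        rw [ih hrest (m + 1) h y (by omega) (by omega)]
        simp only [List.count_cons, beq_self_eq_true, if_true,
          show (('m' : Char) == 'h') = false from by decide,
          show (('m' : Char) == 'y') = false from by decide, if_false, Bool.false_eq_true,
          Nat.add_zero]
        split
        · simp only [Option.some.injEq, Prod.mk.injEq]
          try constructor
          all_goals try constructor
          all_goals first | trivial | (push_cast; ring)
        · rfl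
    · by_cases hh : c = 'h'
      · subst hh
        have hp : ∀ (P : Bool), (h + 1 > m || y > h + 1 || y > m) = P →
            prefA3 ('h' :: rest) m h y = if P then false else prefA3 rest m (h + 1) y := by
          intro P hP
          rw [prefA3]
          simp only [eq_self_iff_true, if_true,
            show (('h' : Char) = 'm') = False from by simp,
            show (('y' : Char) = 'm') = False from by simp,
            show (('y' : Char) = 'h') = False from by simp, if_false, hP]
        conv_lhs => rw [mhyRunB]
        simp only [beq_self_eq_true, if_true,
          show (('h' : Char) == 'm') = false from by decide, if_false, Bool.false_eq_true]
        by_cases hcond : (h + 1 > m ∨ y > h + 1)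
        · have hb : (h + 1 > m || y > h + 1) = true := by
            simp only [Bool.or_eq_true, decide_eq_true_eq]; tauto
          rw [hp true (by simp only [Bool.or_eq_true, decide_eq_true_eq]; tauto)]
          rw [if_pos hb]
          simp
        · have hb : (h + 1 > m || y > h + 1) = false := by
            simp only [Bool.or_eq_false_iff, decide_eq_false_iff_not]; omega
          rw [hp false (by simp only [Bool.or_eq_false_iff, decide_eq_false_iff_not]; omega)]
          rw [if_neg (by rw [hb]; simp)]
          rw [ih hrest m (h + 1) y (by omega) (by omega)]
          simp only [List.count_cons, beq_self_eq_true, if_true,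
            show (('h' : Char) == 'm') = false from by decide,
            show (('h' : Char) == 'y') = false from by decide, if_false, Bool.false_eq_true,
            Nat.add_zero]
          split
          · simp only [Option.some.injEq, Prod.mk.injEq]
            try constructor
            all_goals try constructor
            all_goals first | trivial | (push_cast; ring)
          · rfl
      · by_cases hy : c = 'y'
        · subst hy
          have hp : ∀ (P : Bool), (h > m || y + 1 > h || y + 1 > m) = P →
              prefA3 ('y' :: rest) m h y = if P then false else prefA3 rest m h (y + 1) := by
            intro P hP
            rw [prefA3]
            simp only [eq_self_iff_true, if_true,
              show (('h' : Char) = 'm') = False from by simp,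
              show (('y' : Char) = 'm') = False from by simp,
              show (('y' : Char) = 'h') = False from by simp, if_false, hP]
          conv_lhs => rw [mhyRunB]
          simp only [beq_self_eq_true, if_true,
            show (('y' : Char) == 'm') = false from by decide,
            show (('y' : Char) == 'h') = false from by decide, if_false, Bool.false_eq_true]
          by_cases hcond : (h > m ∨ y + 1 > h)
          · have hb : (h > m || y + 1 > h) = true := by
              simp only [Bool.or_eq_true, decide_eq_true_eq]; tauto
            rw [hp true (by simp only [Bool.or_eq_true, decide_eq_true_eq]; tauto)]
            rw [if_pos hb]
            simp
          · have hb : (h > m || y + 1 > h) = false := by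
              simp only [Bool.or_eq_false_iff, decide_eq_false_iff_not]; omega
            rw [hp false (by simp only [Bool.or_eq_false_iff, decide_eq_false_iff_not]; omega)]
            rw [if_neg (by rw [hb]; simp)]
            rw [ih hrest m h (y + 1) (by omega) (by omega)]
            simp only [List.count_cons, beq_self_eq_true, if_true,
              show (('y' : Char) == 'm') = false from by decide,
              show (('y' : Char) == 'h') = false from by decide, if_false, Bool.false_eq_true,
              Nat.add_zero]
            split
            · simp only [Option.some.injEq, Prod.mk.injEq]
              try constructor
              all_goals try constructor
              all_goals first | trivial | (push_cast; ring)
            · rfl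
        · exfalso
          have : isMhyB c = false := by simp [isMhyB, hm, hh, hy]
          rw [this] at hc
          exact absurd hc (by simp)

theorem prefA3_filter (cs : List Char) (m h y : Int) :
    prefA3 (cs.filter isMhyB) m h y = prefA3 cs m h y := by
  induction cs generalizing m h y with
  | nil => simp
  | cons c rest ih =>
    by_cases hmhy : isMhyB c = true
    · rw [List.filter_cons_of_pos hmhy]
      conv_lhs => rw [prefA3]
      conv_rhs => rw [prefA3]
      split_ifs <;> first | rfl | exact ih _ _ _
    · have hm : c ≠ 'm' := by rintro rfl; exact hmhy (by decide)
      have hh : c ≠ 'h' := by rintro rfl; exact hmhy (by decide)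
      have hy : c ≠ 'y' := by rintro rfl; exact hmhy (by decide)
      rw [List.filter_cons_of_neg (by simp [hmhy])]
      conv_rhs => rw [prefA3]
      rw [if_neg hm, if_neg hh, if_neg hy]
      exact ih _ _ _

theorem count_filter_mhy (l : List Char) (k : Char) (hk : isMhyB k = true) :
    (l.filter isMhyB).count k = l.count k :=
  List.count_filter hk

theorem count_filter_nonmhy (l : List Char) (k : Char) (hk : nonMhy k = true) :
    (l.filter nonMhy).count k = l.count k :=
  List.count_filter hk

theorem allMhy_filter (l : List Char) : (l.filter isMhyB).all isMhyB = true := by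
  simp only [List.all_eq_true, List.mem_filter]
  exact fun a ha => ha.2

theorem whileA_acc (t : List Char) : ∀ (si diff : List Char),
    whileA si t diff = ((whileA si t []).1, (whileA si t []).2.1, diff ++ (whileA si t []).2.2) := by
  induction t with
  | nil =>
    intro si diff
    rw [whileA_nil, whileA_nil]
    simp
  | cons d t' ih =>
    intro si diff
    cases si with
    | nil =>
      rw [whileA_nil_left, whileA_nil_left]
      simp
    | cons c si' =>
      by_cases hcd : (c == d) = true
      · rw [whileA, if_pos hcd, whileA, if_pos hcd]
        exact ih si' diff
      · rw [whileA, if_neg hcd, whileA, if_neg hcd]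
        rw [ih (c :: si') (diff ++ [d]), ih (c :: si') ([] ++ [d])]
        simp [List.append_assoc]

theorem whileA_filter (t : List Char) : ∀ (si : List Char),
    si.all (fun c => !isMhyB c) = true →
    ((((whileA si t []).1 = [] ∧
        ((whileA si t []).2.2 ++ (whileA si t []).2.1).all isMhyB = true) ↔
      t.filter (fun c => !isMhyB c) = si)
     ∧ (t.filter (fun c => !isMhyB c) = si →
        (whileA si t []).2.2 ++ (whileA si t []).2.1 = t.filter isMhyB)) := by
  induction t with
  | nil =>
    intro si hsi
    rw [whileA_nil]
    simp only [List.filter_nil, List.append_nil, List.all_nil]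
    simp [eq_comm]
  | cons d t' ih =>
    intro si hsi
    cases si with
    | nil =>
      rw [whileA_nil_left]
      simp only [List.nil_append, true_and]
      constructor
      · rw [Bool.eq_iff_iff.1 rfl]
        constructor
        · intro hall
          apply List.filter_eq_nil_iff.2
          intro a ha
          have := (List.all_eq_true.1 hall) a ha
          simp only [Bool.not_eq_true']
          simpa using this
        · intro hfil
          apply List.all_eq_true.2
          intro a ha
          have := List.filter_eq_nil_iff.1 hfil a ha
          simpa using this
      · intro hfil
        symm
        apply List.filter_eq_self.2
        intro a ha
        have := List.filter_eq_nil_iff.1 hfil a ha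
        simpa using this
    | cons c si' =>
      have hc : isMhyB c = false := by
        have := (List.all_eq_true.1 hsi) c (by simp)
        simpa using this
      have hsi' : si'.all (fun c => !isMhyB c) = true := by
        apply List.all_eq_true.2
        intro a ha
        exact (List.all_eq_true.1 hsi) a (by simp [ha])
      by_cases hcd : (c == d) = true
      · have hdc : d = c := (beq_iff_eq.1 hcd).symm
        subst hdc
        rw [whileA, if_pos hcd]
        obtain ⟨ih1, ih2⟩ := ih si' hsi'
        have hfil : (d :: t').filter (fun c => !isMhyB c) = d :: t'.filter (fun c => !isMhyB c) :=
          List.filter_cons_of_pos (by simp [hc])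
        constructor
        · rw [hfil]
          rw [List.cons_eq_cons]
          constructor
          · rintro h
            exact ⟨rfl, ih1.1 h⟩
          · rintro ⟨-, h⟩
            exact ih1.2 h
        · intro h
          rw [hfil, List.cons_eq_cons] at h
          rw [ih2 h.2]
          rw [List.filter_cons_of_neg (by simp [hc])]
      · rw [whileA, if_neg hcd]
        rw [whileA_acc t' (c :: si') ([] ++ [d])]
        obtain ⟨ih1, ih2⟩ := ih (c :: si') hsi
        simp only [List.nil_append]
        have hE : (([d] ++ (whileA (c :: si') t' []).2.2) ++ (whileA (c :: si') t' []).2.1) =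
            d :: ((whileA (c :: si') t' []).2.2 ++ (whileA (c :: si') t' []).2.1) := by
          simp
        by_cases hd : isMhyB d = true
        · have hfil : (d :: t').filter (fun c => !isMhyB c) = t'.filter (fun c => !isMhyB c) :=
            List.filter_cons_of_neg (by simp [hd])
          constructor
          · rw [hfil, hE]
            simp only [List.all_cons, hd, Bool.true_and]
            exact ih1
          · intro h
            rw [hfil] at h
            rw [hE, ih2 h, List.filter_cons_of_pos hd]
        · have hfil : (d :: t').filter (fun c => !isMhyB c) = d :: t'.filter (fun c => !isMhyB c) :=
            List.filter_cons_of_pos (by simp [hd])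
          constructor
          · rw [hfil, hE]
            simp only [List.all_cons, hd, Bool.false_and]
            constructor
            · rintro ⟨-, habs⟩
              exact absurd habs (by simp)
            · intro h
              rw [List.cons_eq_cons] at h
              exact absurd (beq_iff_eq.2 h.1.symm) (by simp [hcd])
          · intro h
            rw [hfil, List.cons_eq_cons] at h
            exact absurd (beq_iff_eq.2 h.1.symm) (by simp [hcd])

theorem fA_eq (s : String) :
    fA s.toList = if prefA3 s.toList 0 0 0 then s.toList.filter nonMhy else ['#'] := by
  have hsnd := fLoopA_snd s.toList PySem.Dict.empty []
  simp only [fA, hsnd, PySem.Dict.getD_empty]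
  by_cases hpre : prefA3 s.toList 0 0 0 = true
  · rw [if_pos hpre, if_pos hpre,
      fLoopA_fst _ _ _ (by simp only [PySem.Dict.getD_empty]; exact hpre)]
    simp
  · rw [if_neg hpre, if_neg hpre]

theorem checkA_true_iff (s t : String) :
    check s t = true ↔
      ((∀ k : Char, (s.toList.count k : Int) < t.toList.count k → (k = 'm' ∨ k = 'h' ∨ k = 'y')) ∧
       (max ((t.toList.count 'm' : Int) - s.toList.count 'm') 0 =
          max ((t.toList.count 'h' : Int) - s.toList.count 'h') 0 ∧
        max ((t.toList.count 'h' : Int) - s.toList.count 'h') 0 =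
          max ((t.toList.count 'y' : Int) - s.toList.count 'y') 0) ∧
       prefA3 s.toList 0 0 0 = true ∧
       s.toList.filter nonMhy ≠ ['#'] ∧
       (whileA (s.toList.filter nonMhy) t.toList []).1 = [] ∧
       mhySeqOkB ((whileA (s.toList.filter nonMhy) t.toList []).2.2 ++
         (whileA (s.toList.filter nonMhy) t.toList []).2.1) 0 0 0 = true) := by
  simp only [check]
  by_cases hff : ffA s.toList t.toList = true
  · rw [hff]
    simp only [Bool.not_true, Bool.false_eq_true, if_false]
    obtain ⟨hP1, hP2⟩ := (ffA_iff s.toList t.toList).1 hff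
    rw [fA_eq]
    by_cases hpre : prefA3 s.toList 0 0 0 = true
    · rw [if_pos hpre]
      by_cases hhash : s.toList.filter nonMhy = ['#']
      · rw [hhash]
        simp only [show ((['#'] : List Char) == ['#']) = true from by decide, if_true]
        simp only [Bool.false_eq_true, false_iff]
        rintro ⟨-, -, -, hne, -⟩
        exact hne rfl
      · rw [if_neg (by simp [hhash])]
        set W := whileA (s.toList.filter nonMhy) t.toList [] with hW
        by_cases hsi : W.1 = []
        · rw [if_neg (by simp [hsi])]
          set diff := W.2.2 ++ W.2.1 with hdiff
          simp only [PySem.Dict.getD_counter]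
          by_cases hq : (diff.count 'm' : Int) = diff.count 'h' ∧
              (diff.count 'h' : Int) = diff.count 'y' ∧
              (diff.count 'm' : Int) + diff.count 'h' + diff.count 'y' = diff.length
          · obtain ⟨hq1, hq2, hq3⟩ := hq
            have e1 : (((diff.count 'm' : Int)) != ((diff.count 'h' : Int))) = false := by
              rw [bne_eq_false_iff_eq]; exact hq1
            have e2 : (((diff.count 'h' : Int)) != ((diff.count 'y' : Int))) = false := by
              rw [bne_eq_false_iff_eq]; exact hq2
            have e3 : (((diff.count 'm' : Int)) != ((diff.count 'y' : Int))) = false := by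
              rw [bne_eq_false_iff_eq]; omega
            have e4 : ((diff.count 'm' : Int) + diff.count 'h' + diff.count 'y' !=
                (diff.length : Int)) = false := by
              rw [bne_eq_false_iff_eq]; exact hq3
            have hcond : (((diff.count 'm' : Int) != diff.count 'h') ||
                ((diff.count 'h' : Int) != diff.count 'y') ||
                ((diff.count 'm' : Int) != diff.count 'y') ||
                ((diff.count 'm' : Int) + diff.count 'h' + diff.count 'y' != (diff.length : Int))) =
                false := by
              rw [e1, e2, e3, e4]; rfl
            have hq : (diff.count 'm' : Int) = diff.count 'h' ∧
                (diff.count 'h' : Int) = diff.count 'y' ∧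
                (diff.count 'm' : Int) + diff.count 'h' + diff.count 'y' = diff.length :=
              ⟨hq1, hq2, hq3⟩
            rw [if_neg (by rw [hcond]; simp)]
            rw [prefLoopA_eq diff PySem.Dict.empty (by simp [PySem.Dict.getD_empty])
              (by simp [PySem.Dict.getD_empty]), PySem.Dict.getD_empty, PySem.Dict.getD_empty,
              PySem.Dict.getD_empty]
            rw [mhySeqOkB_spec diff 0 0 0 le_rfl le_rfl]
            have hall : diff.all (fun c => !nonMhy c) = true :=
              (count_sum_eq_length_iff diff).1 (by omega)
            rw [hall]
            simp only [Bool.true_and, zero_add]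
            have d1 : decide ((diff.count 'm' : Int) = diff.count 'h') = true := by
              simp only [decide_eq_true_eq]; omega
            have d2 : decide ((diff.count 'h' : Int) = diff.count 'y') = true := by
              simp only [decide_eq_true_eq]; omega
            rw [d1, d2]
            simp only [Bool.and_true]
            constructor
            · intro hp3; exact ⟨hP1, hP2, hpre, hhash, hsi, hp3⟩
            · rintro ⟨-, -, -, -, -, h5⟩
              exact h5
          · have hcond : (((diff.count 'm' : Int) != diff.count 'h') ||
                ((diff.count 'h' : Int) != diff.count 'y') ||
                ((diff.count 'm' : Int) != diff.count 'y') ||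
                ((diff.count 'm' : Int) + diff.count 'h' + diff.count 'y' != (diff.length : Int))) =
                true := by
              simp only [Bool.or_eq_true, bne_iff_ne, ne_eq]
              by_cases c1 : (diff.count 'm' : Int) = diff.count 'h'
              · by_cases c2 : (diff.count 'h' : Int) = diff.count 'y'
                · exact Or.inr (fun hL => hq ⟨c1, c2, hL⟩)
                · exact Or.inl (Or.inl (Or.inr c2))
              · exact Or.inl (Or.inl (Or.inl c1))
            rw [if_pos hcond]
            simp only [Bool.false_eq_true, false_iff]
            rintro ⟨-, -, -, -, -, h5⟩
            rw [mhySeqOkB_spec _ 0 0 0 le_rfl le_rfl] at h5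
            simp only [Bool.and_eq_true, decide_eq_true_eq, zero_add] at h5
            obtain ⟨⟨hall, -⟩, e1, e2⟩ := h5
            have := (count_sum_eq_length_iff diff).2 hall
            exact hq ⟨by omega, by omega, by omega⟩
        · rw [if_pos (by simp [List.isEmpty_iff, hsi])]
          simp only [Bool.false_eq_true, false_iff]
          rintro ⟨-, -, -, -, h4, -⟩
          exact hsi h4
    · rw [if_neg hpre]
      simp only [show ((['#'] : List Char) == ['#']) = true from by decide, if_true]
      simp only [Bool.false_eq_true, false_iff]
      rintro ⟨-, -, h3, -⟩
      exact hpre h3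
  · rw [show ffA s.toList t.toList = false from by revert hff; cases ffA s.toList t.toList <;> simp]
    simp only [Bool.not_false, if_true]
    simp only [Bool.false_eq_true, false_iff]
    rintro ⟨hP1, hP2, -⟩
    exact hff ((ffA_iff s.toList t.toList).2 ⟨hP1, hP2⟩)

theorem A_false_of_residual_hash (s t : String)
    (hf : s.toList.filter nonMhy = ['#']) : check s t = false := by
  cases hc : check s t with
  | false => rfl
  | true =>
    obtain ⟨-, -, -, hne, -⟩ := (checkA_true_iff s t).1 hc
    exact absurd hf hne

theorem mhySeqOk_filter_iff (l : List Char) :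
    mhySeqOkB (l.filter isMhyB) 0 0 0 = true ↔
      (prefA3 l 0 0 0 = true ∧ ((l.count 'm' : Int) = l.count 'h' ∧
        (l.count 'h' : Int) = l.count 'y')) := by
  have hallt : (l.filter isMhyB).all (fun c => !nonMhy c) = true := by
    have := allMhy_filter l
    simp only [List.all_eq_true] at this ⊢
    intro a ha
    rw [← isMhyB_eq]
    exact this a ha
  rw [mhySeqOkB_spec _ 0 0 0 le_rfl le_rfl, hallt, prefA3_filter]
  simp only [Bool.true_and, Bool.and_eq_true, decide_eq_true_eq, zero_add,
    count_filter_mhy _ 'm' (by decide), count_filter_mhy _ 'h' (by decide),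
    count_filter_mhy _ 'y' (by decide)]

theorem checkB_iff (s t : String) :
    check_alt s t = true ↔
      (prefA3 s.toList 0 0 0 = true ∧
       t.toList.filter nonMhy = s.toList.filter nonMhy ∧
       mhySeqOkB (t.toList.filter isMhyB) 0 0 0 = true ∧
       (max ((t.toList.count 'm' : Int) - s.toList.count 'm') 0 =
          max ((t.toList.count 'h' : Int) - s.toList.count 'h') 0 ∧
        max ((t.toList.count 'h' : Int) - s.toList.count 'h') 0 =
          max ((t.toList.count 'y' : Int) - s.toList.count 'y') 0)) := by
  have hokiff := mhySeqOk_filter_iff t.toList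
  simp only [check_alt, show (fun c => isMhyB c) = isMhyB from rfl, isMhyB_not_nonMhy]
  rw [mhyRunB_eq _ (allMhy_filter s.toList) 0 0 0 le_rfl le_rfl, prefA3_filter]
  by_cases hpre : prefA3 s.toList 0 0 0 = true
  · rw [if_pos hpre]
    simp only [zero_add, count_filter_mhy _ 'm' (by decide), count_filter_mhy _ 'h' (by decide),
      count_filter_mhy _ 'y' (by decide)]
    by_cases heq : t.toList.filter nonMhy = s.toList.filter nonMhy
    · rw [if_neg (show ¬((t.toList.filter nonMhy != s.toList.filter nonMhy) = true) by
        simp [heq])]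
      rw [mhyRunB_eq _ (allMhy_filter t.toList) 0 0 0 le_rfl le_rfl, prefA3_filter]
      by_cases hpt : prefA3 t.toList 0 0 0 = true
      · rw [if_pos hpt]
        simp only [zero_add, count_filter_mhy _ 'm' (by decide), count_filter_mhy _ 'h' (by decide),
          count_filter_mhy _ 'y' (by decide)]
        by_cases hbal : (t.toList.count 'm' : Int) = t.toList.count 'h' ∧
            (t.toList.count 'h' : Int) = t.toList.count 'y'
        · have hb : (((t.toList.count 'm' : Int)) == ((t.toList.count 'h' : Int)) &&
              ((t.toList.count 'h' : Int)) == ((t.toList.count 'y' : Int))) = true := by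
            simp only [Bool.and_eq_true, beq_iff_eq]
            exact hbal
          rw [if_neg (show ¬((!(((t.toList.count 'm' : Int)) == ((t.toList.count 'h' : Int)) &&
              ((t.toList.count 'h' : Int)) == ((t.toList.count 'y' : Int)))) = true) by
            rw [hb]; simp)]
          simp only [Bool.and_eq_true, beq_iff_eq]
          constructor
          · rintro ⟨e1, e2⟩
            exact ⟨hpre, heq, hokiff.2 ⟨hpt, hbal⟩, e1, e2⟩
          · rintro ⟨-, -, -, e1, e2⟩
            exact ⟨e1, e2⟩
        · have hb : (((t.toList.count 'm' : Int)) == ((t.toList.count 'h' : Int)) &&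
              ((t.toList.count 'h' : Int)) == ((t.toList.count 'y' : Int))) = false := by
            simp only [Bool.and_eq_false_iff, beq_eq_false_iff_ne, ne_eq]
            by_cases c1 : (t.toList.count 'm' : Int) = t.toList.count 'h'
            · exact Or.inr (fun c2 => hbal ⟨c1, c2⟩)
            · exact Or.inl c1
          rw [if_pos (show ((!(((t.toList.count 'm' : Int)) == ((t.toList.count 'h' : Int)) &&
              ((t.toList.count 'h' : Int)) == ((t.toList.count 'y' : Int)))) = true) by
            rw [hb]; rfl)]
          simp only [Bool.false_eq_true, false_iff]
          rintro ⟨-, -, hok, -⟩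
          exact hbal (hokiff.1 hok).2
      · rw [if_neg hpt]
        simp only [Bool.false_eq_true, false_iff]
        rintro ⟨-, -, hok, -⟩
        exact hpt (hokiff.1 hok).1
    · rw [if_pos (show ((t.toList.filter nonMhy != s.toList.filter nonMhy) = true) by
        simp [bne_iff_ne, heq])]
      simp only [Bool.false_eq_true, false_iff]
      rintro ⟨-, h2, -⟩
      exact heq h2
  · rw [if_neg hpre]
    simp only [Bool.false_eq_true, false_iff]
    rintro ⟨h1, -⟩
    exact hpre h1

theorem residual_all_nonmhy (s : String) :
    (s.toList.filter nonMhy).all (fun c => !isMhyB c) = true := by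
  rw [isMhyB_not_nonMhy]
  simp only [List.all_eq_true, List.mem_filter]
  exact fun a ha => ha.2

theorem A_eq_B_of_residual_ne (s t : String)
    (hf : s.toList.filter nonMhy ≠ ['#']) : check s t = check_alt s t := by
  rw [Bool.eq_iff_iff, checkA_true_iff, checkB_iff]
  obtain ⟨hw1, hw2⟩ := whileA_filter t.toList (s.toList.filter nonMhy) (residual_all_nonmhy s)
  rw [isMhyB_not_nonMhy] at hw1 hw2
  constructor
  · rintro ⟨hP1, hP2, hpre, -, hW1, hok⟩
    have hallE : ((whileA (s.toList.filter nonMhy) t.toList []).2.2 ++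
        (whileA (s.toList.filter nonMhy) t.toList []).2.1).all isMhyB = true := by
      rw [mhySeqOkB_spec _ 0 0 0 le_rfl le_rfl] at hok
      simp only [Bool.and_eq_true] at hok
      obtain ⟨⟨hall, -⟩, -⟩ := hok
      simp only [List.all_eq_true] at hall ⊢
      intro a ha
      rw [isMhyB_eq]
      exact hall a ha
    have heq := hw1.1 ⟨hW1, hallE⟩
    have hE := hw2 heq
    exact ⟨hpre, heq, by rw [← hE]; exact hok, hP2⟩
  · rintro ⟨hpre, heq, hok, hsur⟩
    obtain ⟨hW1, -⟩ := hw1.2 heq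
    have hE := hw2 heq
    have hP1 : ∀ k : Char, (s.toList.count k : Int) < t.toList.count k →
        (k = 'm' ∨ k = 'h' ∨ k = 'y') := by
      intro k hk
      by_contra hnk
      push_neg at hnk
      obtain ⟨n1, n2, n3⟩ := hnk
      have hknm : nonMhy k = true := by simp [nonMhy, n1, n2, n3]
      have e1 := count_filter_nonmhy t.toList k hknm
      have e2 := count_filter_nonmhy s.toList k hknm
      rw [heq, e2] at e1
      omega
    exact ⟨hP1, hsur, hpre, hf, hW1, by rw [hE]; exact hok⟩

theorem counts_le_of_prefixLe (cs : List Char) (h : mhyPrefixLe cs = true) :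
    cs.count 'h' ≤ cs.count 'm' ∧ cs.count 'y' ≤ cs.count 'h' := by
  rw [← prefA3_zero_iff] at h
  have := (prefA3_iff cs 0 0 0 le_rfl le_rfl).1 h cs.length
  rw [List.take_length] at this
  omega

theorem D_iff (s t : String) :
    D_check s t ↔ (check_alt s t = true ∧ s.toList.filter nonMhy = ['#']) := by
  rw [checkB_iff, mhySeqOk_filter_iff t.toList]
  unfold D_check
  constructor
  · rintro ⟨h1, h2, h3, h4, h5, h6, h7⟩
    have hle := counts_le_of_prefixLe s.toList h3
    refine ⟨⟨by rw [prefA3_zero_iff]; exact h3, h2.trans h1.symm,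
      ⟨by rw [prefA3_zero_iff]; exact h4, by exact_mod_cast h5, by exact_mod_cast h6⟩,
      ?_, ?_⟩, h1⟩
    · rcases h7 with h7 | h7 <;> omega
    · rcases h7 with h7 | h7 <;> omega
  · rintro ⟨⟨hp, heq, ⟨hpt, hc1, hc2⟩, hs1, hs2⟩, hres⟩
    have h3 : mhyPrefixLe s.toList = true := by rw [← prefA3_zero_iff]; exact hp
    have hle := counts_le_of_prefixLe s.toList h3
    refine ⟨hres, by rw [heq, hres], h3, by rw [← prefA3_zero_iff]; exact hpt,
      by exact_mod_cast hc1, by exact_mod_cast hc2, ?_⟩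
    omega

-- ===== VERDICT (by name: the statement is the Claim_ definition above) =====
theorem check_spec : Claim_unchanged_check := by
  intro s t _ hD
  by_cases hf : s.toList.filter nonMhy = ['#']
  · rw [A_false_of_residual_hash s t hf]
    cases hb : check_alt s t
    · rfl
    · exact absurd ((D_iff s t).2 ⟨hb, hf⟩) hD
  · exact A_eq_B_of_residual_ne s t hf

theorem check_changed : Claim_changed_check := by
  unfold Claim_changed_check; decide

theorem check_tight : Claim_exact_check := by
  intro s t _ hD
  obtain ⟨hB, hf⟩ := (D_iff s t).1 hD
  rw [A_false_of_residual_hash s t hf, hB]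
  decide
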